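-- pv_equiv track=rewrite | github.com/yincma/AMAZON-BEDROCK-AGENTS | agents/quality_checker.py | _get_coherence_recommendation
-- ===== SOURCE A (Python) =====
-- from typing import Dict, Any, List
--
-- def _get_coherence_recommendation(score: int, issues: List[Dict[str, Any]]) -> str:
--     """生成连贯性改进建议"""
--     if score >= 90:
--         return "内容连贯性很好，逻辑清晰"
--     elif score >= 70:
--         return "内容基本连贯，建议加强页面间的过渡"
--     else:
--         recommendations = ["内容连贯性需要改进"]
--         if any(issue.get("issue") == "topic_jump" for issue in issues):
--             recommendations.append("建议添加过渡页面或调整内容顺序")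
--         if any(issue.get("issue") == "missing_introduction" for issue in issues):
--             recommendations.append("需要添加引言页")
--         if any(issue.get("issue") == "missing_conclusion" for issue in issues):
--             recommendations.append("需要添加总结页")
--         return "；".join(recommendations)
-- ===== SOURCE B (Python) =====
-- def _get_coherence_recommendation(score, issues):
--     if score >= 90:
--         return "内容连贯性很好，逻辑清晰"
--     elif score >= 70:
--         return "内容基本连贯，建议加强页面间的过渡"
--     has_topic_jump = has_missing_intro = has_missing_conclusion = False
--     for issue in issues:
--         v = issue.get("issue")
--         has_topic_jump = has_topic_jump or v == "topic_jump"
--         has_missing_intro = has_missing_intro or v == "missing_introduction"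
--         has_missing_conclusion = has_missing_conclusion or v == "missing_conclusion"
--     parts = ["内容连贯性需要改进"]
--     if has_topic_jump:
--         parts.append("建议添加过渡页面或调整内容顺序")
--     if has_missing_intro:
--         parts.append("需要添加引言页")
--     if has_missing_conclusion:
--         parts.append("需要添加总结页")
--     return "；".join(parts)
-- ===== Notes on version B (the rewrite author's own statement) =====
-- stated objective: simpler
-- what changed: Replaces the three separate any()-scans over issues with a single collecting pass that sets three boolean flags, then assembles the recommendation list from those flags.
import Mathlib
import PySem

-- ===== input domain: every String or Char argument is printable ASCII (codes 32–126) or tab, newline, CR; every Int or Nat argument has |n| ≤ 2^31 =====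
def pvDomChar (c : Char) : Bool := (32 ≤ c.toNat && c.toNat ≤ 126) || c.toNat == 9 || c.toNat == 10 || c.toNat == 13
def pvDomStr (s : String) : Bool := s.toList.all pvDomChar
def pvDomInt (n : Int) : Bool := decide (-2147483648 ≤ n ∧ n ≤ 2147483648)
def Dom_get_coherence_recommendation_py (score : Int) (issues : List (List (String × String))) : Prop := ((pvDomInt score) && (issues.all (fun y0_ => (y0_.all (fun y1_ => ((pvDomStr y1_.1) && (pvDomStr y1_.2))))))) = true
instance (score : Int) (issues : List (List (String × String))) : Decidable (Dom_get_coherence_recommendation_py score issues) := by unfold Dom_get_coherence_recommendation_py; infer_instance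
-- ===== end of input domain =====

-- B replaces A's three separate any()-scans over `issues` by one collecting pass that
-- sets three boolean flags, then assembles the recommendation list from those flags (objective: simpler).

-- ===== PORT A =====
def get_coherence_recommendation_py (score : Int) (issues : List (List (String × String))) : String :=
  if score ≥ 90 then "内容连贯性很好，逻辑清晰"
  else if score ≥ 70 then "内容基本连贯，建议加强页面间的过渡"
  else
    let recommendations : List String := ["内容连贯性需要改进"]
    let recommendations := if issues.any (fun issue => (PySem.Dict.mk issue).get? "issue" == some "topic_jump")
      then recommendations ++ ["建议添加过渡页面或调整内容顺序"] else recommendations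
    let recommendations := if issues.any (fun issue => (PySem.Dict.mk issue).get? "issue" == some "missing_introduction")
      then recommendations ++ ["需要添加引言页"] else recommendations
    let recommendations := if issues.any (fun issue => (PySem.Dict.mk issue).get? "issue" == some "missing_conclusion")
      then recommendations ++ ["需要添加总结页"] else recommendations
    PySem.Str.join "；" recommendations

-- ===== PORT B =====
def get_coherence_recommendation_py_alt (score : Int) (issues : List (List (String × String))) : String :=
  if score ≥ 90 then "内容连贯性很好，逻辑清晰"
  else if score ≥ 70 then "内容基本连贯，建议加强页面间的过渡"
  else
    let flags : Bool × Bool × Bool := issues.foldl (fun f issue =>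
      let v := (PySem.Dict.mk issue).get? "issue"
      (f.1 || v == some "topic_jump", f.2.1 || v == some "missing_introduction", f.2.2 || v == some "missing_conclusion"))
      (false, false, false)
    PySem.Str.join "；" (["内容连贯性需要改进"] ++
      (if flags.1 then ["建议添加过渡页面或调整内容顺序"] else []) ++
      (if flags.2.1 then ["需要添加引言页"] else []) ++
      (if flags.2.2 then ["需要添加总结页"] else []))

-- ===== PRECONDITION & SPEC =====
def Spec_get_coherence_recommendation_py (score : Int) (issues : List (List (String × String))) (out : String) : Prop := out = get_coherence_recommendation_py_alt score issues
instance (score : Int) (issues : List (List (String × String))) (out : String) : Decidable (Spec_get_coherence_recommendation_py score issues out) := by unfold Spec_get_coherence_recommendation_py; infer_instance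

-- ===== CLAIM (what is proved, stated in full; the proofs are below) =====
def Claim_equal_get_coherence_recommendation_py : Prop := ∀ (score : Int) (issues : List (List (String × String))), Dom_get_coherence_recommendation_py score issues → Spec_get_coherence_recommendation_py score issues (get_coherence_recommendation_py score issues)

-- ===== LEMMAS AND PROOFS =====

-- B's single pass computes the three any()-tests of A.
theorem pv_flags_eq (issues : List (List (String × String))) (a b c : Bool) :
    issues.foldl (fun (f : Bool × Bool × Bool) issue =>
      let v := (PySem.Dict.mk issue).get? "issue"
      (f.1 || v == some "topic_jump", f.2.1 || v == some "missing_introduction", f.2.2 || v == some "missing_conclusion"))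
      (a, b, c)
    = (a || issues.any (fun issue => (PySem.Dict.mk issue).get? "issue" == some "topic_jump"),
       b || issues.any (fun issue => (PySem.Dict.mk issue).get? "issue" == some "missing_introduction"),
       c || issues.any (fun issue => (PySem.Dict.mk issue).get? "issue" == some "missing_conclusion")) := by
  induction issues generalizing a b c with
  | nil => simp
  | cons h t ih => simp [List.foldl_cons, ih, Bool.or_assoc]

theorem get_coherence_recommendation_py_eq (score : Int) (issues : List (List (String × String))) :
    get_coherence_recommendation_py score issues = get_coherence_recommendation_py_alt score issues := by
  unfold get_coherence_recommendation_py get_coherence_recommendation_py_alt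
  by_cases h90 : score ≥ 90
  · simp [h90]
  · by_cases h70 : score ≥ 70
    · simp [h90, h70]
    · simp only [h90, h70, if_false, pv_flags_eq]
      by_cases h1 : issues.any (fun issue => (PySem.Dict.mk issue).get? "issue" == some "topic_jump") <;>
      by_cases h2 : issues.any (fun issue => (PySem.Dict.mk issue).get? "issue" == some "missing_introduction") <;>
      by_cases h3 : issues.any (fun issue => (PySem.Dict.mk issue).get? "issue" == some "missing_conclusion") <;>
      simp [h1, h2, h3]

-- ===== VERDICT (by name: the statement is the Claim_ definition above) =====
theorem get_coherence_recommendation_py_spec : Claim_equal_get_coherence_recommendation_py := by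
  intro score issues _
  unfold Spec_get_coherence_recommendation_py
  exact get_coherence_recommendation_py_eq score issues
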